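-- pv_equiv track=rewrite | github.com/sala0320/Algorithm | Brute_force/프로그래머스/모의고사/solution.py | solution
-- ===== SOURCE A (Python) =====
-- def solution(answers):
--     answer = []
--     student = [[1, 2, 3, 4, 5]*2000, [2, 1, 2, 3, 2, 4, 2, 5]*1250,[3, 3, 1, 1, 2, 2, 4, 4, 5, 5]*1000]
--     score = []
--     for s in student:
--         score.append(len([i for i,j in zip(s, answers) if i == j]))
--     1
--     max_s = max(score)
--     answer = [i+1 for i,s in enumerate(score) if s == max_s]
--     return answer
-- ===== SOURCE B (Python) =====
-- def solution(answers):
--     # Tally answers into a frequency table keyed by (index residue mod 40,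
--     # answer value); 40 = lcm(5, 8, 10), so each student's answer at position i
--     # depends only on i % 40.  Each score is then a 40-term table lookup sum,
--     # with no per-pattern scan of the answers.  Patterns cover the first 10000
--     # answers only, as in A.
--     pairs = [(i % 40, a) for i, a in enumerate(answers[:10000])]
--     freq = {}
--     for key in pairs:
--         freq[key] = freq.get(key, 0) + 1
--     patterns = [[1, 2, 3, 4, 5],
--                 [2, 1, 2, 3, 2, 4, 2, 5],
--                 [3, 3, 1, 1, 2, 2, 4, 4, 5, 5]]
--     scores = [sum(freq.get((r, p[r % len(p)]), 0) for r in range(40))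
--               for p in patterns]
--     m = max(scores)
--     return [k + 1 for k, s in enumerate(scores) if s == m]
-- ===== Notes on version B (the rewrite author's own statement) =====
-- stated objective: alternative
-- what changed: B first aggregates the answers into one frequency table keyed by (index mod 40, answer value) (40 = lcm of the pattern lengths), then computes each student's score as a 40-term table-lookup sum, instead of materialising three 10000-element pattern lists and zip-filter scanning the answers once per pattern.
import Mathlib
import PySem

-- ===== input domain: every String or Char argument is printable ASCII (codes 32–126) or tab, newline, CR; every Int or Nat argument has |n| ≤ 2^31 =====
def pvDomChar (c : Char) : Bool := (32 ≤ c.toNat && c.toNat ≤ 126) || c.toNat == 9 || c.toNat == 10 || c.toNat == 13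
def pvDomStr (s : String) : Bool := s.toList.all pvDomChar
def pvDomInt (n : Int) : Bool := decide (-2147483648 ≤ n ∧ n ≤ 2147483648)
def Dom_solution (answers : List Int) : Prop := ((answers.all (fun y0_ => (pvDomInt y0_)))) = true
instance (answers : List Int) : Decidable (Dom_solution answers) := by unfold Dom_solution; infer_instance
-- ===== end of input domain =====

-- B aggregates the answers into one frequency table keyed by (index mod 40, answer value)
-- and computes each score as a 40-term table-lookup sum, instead of materialising three
-- 10000-element pattern lists and zip-filter scanning the answers once per pattern
-- (objective: alternative; not claimed faster).


-- ===== PORT A =====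
-- [1,2,3,4,5]*2000 etc. : list repetition ported as flatten of replicate
def solution (answers : List Int) : List Int :=
  let student : List (List Int) :=
    [(List.replicate 2000 ([1, 2, 3, 4, 5] : List Int)).flatten,
     (List.replicate 1250 ([2, 1, 2, 3, 2, 4, 2, 5] : List Int)).flatten,
     (List.replicate 1000 ([3, 3, 1, 1, 2, 2, 4, 4, 5, 5] : List Int)).flatten]
  -- for s in student: score.append(len([i for i,j in zip(s, answers) if i == j]))
  let score : List Int :=
    student.foldl (fun acc s =>
      acc ++ [(((s.zip answers).filter (fun p => p.1 == p.2)).length : Int)]) []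
  -- max(score): score always has 3 elements, so max? is some; getD never used
  let maxS : Int := (PySem.List.max? score (fun y => y)).getD 0
  ((PySem.List.enumerate score).filter (fun p => p.2 == maxS)).map (fun p => p.1 + 1)

-- ===== PORT B =====
def bPatterns : List (List Int) :=
  [[1, 2, 3, 4, 5], [2, 1, 2, 3, 2, 4, 2, 5], [3, 3, 1, 1, 2, 2, 4, 4, 5, 5]]

def solution_alt (answers : List Int) : List Int :=
  -- answers[:10000] (slice with bounds 0 and 10000 = take 10000)
  let pairs : List (Int × Int) :=
    (PySem.List.enumerate (answers.take 10000)).map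
      (fun q => (PySem.Int.mod q.1 40, q.2))
  -- for key in pairs: freq[key] = freq.get(key, 0) + 1
  let freq : PySem.Dict (Int × Int) Int :=
    pairs.foldl (fun d key => d.modify key 0 (· + 1)) PySem.Dict.empty
  -- p[r % len(p)] : 0 ≤ r % len(p) < len(p) always, so pyGetD is exact here
  let scores : List Int :=
    bPatterns.map (fun p =>
      ((PySem.List.pyRange 0 40 1).map (fun r =>
        freq.getD (r, PySem.List.pyGetD p (PySem.Int.mod r (p.length : Int)) 0) 0)).sum)
  let m : Int := (PySem.List.max? scores (fun y => y)).getD 0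
  ((PySem.List.enumerate scores).filter (fun q => q.2 == m)).map (fun q => q.1 + 1)

-- ===== PRECONDITION & SPEC =====
def Spec_solution (answers : List Int) (out : List Int) : Prop := out = solution_alt answers
instance (answers : List Int) (out : List Int) : Decidable (Spec_solution answers out) := by unfold Spec_solution; infer_instance

-- ===== CLAIM (what is proved, stated in full; the proofs are below) =====
def Claim_equal_solution : Prop := ∀ (answers : List Int), Dom_solution answers → Spec_solution answers (solution answers)

-- ===== LEMMAS AND PROOFS =====

-- Nat-valued spec of one cyclic counter: matches of ys against the cycle p from offset n
def cyc (p : List Int) (L : Nat) : List Int → Nat → Nat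
  | [], _ => 0
  | a :: rest, i => (if a == p.getD (i % L) 0 then 1 else 0) + cyc p L rest (i + 1)

theorem flatten_replicate_getElem (p : List Int) (hp : 0 < p.length) (n i : Nat)
    (h : i < n * p.length) :
    (List.replicate n p).flatten[i]'(by simpa using h) = p[i % p.length]'(Nat.mod_lt _ hp) := by
  induction n generalizing i with
  | zero => omega
  | succ n ih =>
    simp only [List.replicate_succ, List.flatten_cons]
    by_cases hi : i < p.length
    · rw [List.getElem_append_left hi]
      congr 1
      exact (Nat.mod_eq_of_lt hi).symm
    · push Not at hi
      rw [List.getElem_append_right hi]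
      rw [ih (i - p.length) (by
        rcases Nat.exists_eq_add_of_le hi with ⟨j, hj⟩
        subst hj
        simp only [Nat.succ_mul] at h
        omega)]
      congr 1
      rw [Nat.mod_eq_sub_mod hi]

-- zip truncates to the first list's length
theorem zip_take_right (s ys : List Int) : s.zip ys = s.zip (ys.take s.length) := by
  induction s generalizing ys with
  | nil => simp
  | cons x t ih =>
    cases ys with
    | nil => simp
    | cons a r =>
      simp only [List.length_cons, List.take_succ_cons, List.zip_cons_cons]
      rw [← ih]

-- A's zip-filter count over the big repeated pattern equals the cyclic count
theorem count_eq_cyc (p : List Int) (n : Nat) (ys : List Int) (i : Nat)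
    (h : i + ys.length ≤ n * p.length) :
    ((((List.replicate n p).flatten.drop i).zip ys).filter (fun q => q.1 == q.2)).length =
      cyc p p.length ys i := by
  induction ys generalizing i with
  | nil => simp [cyc]
  | cons a rest ih =>
    have h' : i + rest.length + 1 ≤ n * p.length := by
      simpa [Nat.add_comm, Nat.add_left_comm] using h
    have hp : 0 < p.length := by
      rcases Nat.eq_zero_or_pos p.length with h0 | h0
      · rw [h0, Nat.mul_zero] at h'; omega
      · exact h0
    have hlen : ((List.replicate n p).flatten).length = n * p.length := by simp
    have hi : i < ((List.replicate n p).flatten).length := by rw [hlen]; omega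
    rw [List.drop_eq_getElem_cons hi, List.zip_cons_cons]
    have hg : (List.replicate n p).flatten[i]'hi = p.getD (i % p.length) 0 := by
      rw [flatten_replicate_getElem p hp n i (by omega),
        List.getD_eq_getElem p 0 (Nat.mod_lt _ hp)]
    rw [hg]
    have hrest := ih (i + 1) (by omega)
    simp only [cyc, List.filter_cons]
    by_cases hc : a = p[i % p.length]?.getD 0
    · simp [List.getD, hc, hrest, Nat.add_comm]
    · simp [List.getD, Ne.symm hc, hrest]
      exact hc

theorem score_entry (p : List Int) (n : Nat) (hn : n * p.length = 10000) (answers : List Int) :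
    ((((List.replicate n p).flatten).zip answers).filter (fun q => q.1 == q.2)).length =
      cyc p p.length (answers.take 10000) 0 := by
  have h1 : ((List.replicate n p).flatten).length = 10000 := by simp [hn]
  rw [zip_take_right, h1]
  have := count_eq_cyc p n (answers.take 10000) 0
    (by rw [hn]; simp only [Nat.zero_add, List.length_take]; omega)
  simpa using this

-- B-side: the tallied pairs, with an explicit enumerate start for the induction
def pairsFrom (n : Nat) (ys : List Int) : List (Int × Int) :=
  (PySem.List.enumerate ys (n : Int)).map (fun q => (PySem.Int.mod q.1 40, q.2))

theorem pairsFrom_cons (n : Nat) (a : Int) (ys : List Int) :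
    pairsFrom n (a :: ys) = ((((n % 40 : Nat)) : Int), a) :: pairsFrom (n + 1) ys := by
  unfold pairsFrom
  rw [PySem.List.enumerate_cons]
  simp [PySem.Int.mod, Int.fmod_eq_emod]

-- a 0/1 sum over range with a single possible hit
theorem sum_range_single (m k0 : Nat) (hk : k0 < m) (f : Nat → Int)
    (h : ∀ k, k < m → k ≠ k0 → f k = 0) :
    ((List.range m).map f).sum = f k0 := by
  induction m with
  | zero => omega
  | succ m ih =>
    rw [List.range_succ, List.map_append, List.sum_append]
    by_cases hm : k0 = m
    · subst hm
      have hz : ((List.range k0).map f).sum = 0 := by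
        apply List.sum_eq_zero
        intro x hx
        obtain ⟨k, hk', rfl⟩ := List.mem_map.1 hx
        exact h k (by simp at hk'; omega) (by simp at hk'; omega)
      simp [hz]
    · rw [ih (by omega) (fun k hk' hne => h k (by omega) hne)]
      simp [h m (by omega) (fun e => hm (e.symm))]

-- B's 40-term count sum equals the cyclic count (each index hits exactly one residue)
theorem bsum_eq_cyc (p : List Int) (hd : p.length ∣ 40) (ys : List Int) (n : Nat) :
    ((List.range 40).map (fun (k : Nat) =>
        ((pairsFrom n ys).count (((k : Int), p.getD (k % p.length) 0)) : Int))).sum =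
      (cyc p p.length ys n : Int) := by
  induction ys generalizing n with
  | nil => simp [pairsFrom, cyc]
  | cons a rest ih =>
    have hc : pairsFrom n (a :: rest) = ((((n % 40 : Nat)) : Int), a) :: pairsFrom (n+1) rest :=
      pairsFrom_cons n a rest
    simp only [hc, List.count_cons]
    push_cast
    rw [PySem.List.sum_map_add_int, ih (n+1)]
    have hcast : ((n : Int) % 40) = (((n % 40 : Nat)) : Int) := by push_cast; ring
    have hone : ((List.range 40).map (fun (k : Nat) =>
        (if ((((n : Int) % 40), a) == ((k : Int), p.getD (k % p.length) 0)) then (1:Int) else 0))).sum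
        = if a == p.getD (n % p.length) 0 then (1:Int) else 0 := by
      rw [sum_range_single 40 (n % 40) (Nat.mod_lt _ (by norm_num)) _ ?_]
      · have hmm : (n % 40) % p.length = n % p.length := Nat.mod_mod_of_dvd n hd
        rw [hcast, hmm]
        by_cases hcond : a = p.getD (n % p.length) 0
        · simp [hcond]
        · simp
      · intro k hk hne
        have hki : (((n:Int)) % 40) ≠ ((k : Int)) := by
          rw [hcast]; exact_mod_cast Ne.symm hne
        simp [Prod.ext_iff, hki]
    rw [hone]
    simp [cyc]
    ring

-- one score entry of B, as written in the port, equals the cyclic count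
theorem b_entry (p : List Int) (hd : p.length ∣ 40) (ys : List Int) :
    ((PySem.List.pyRange 0 40 1).map (fun r =>
      ((pairsFrom 0 ys).foldl (fun d key => d.modify key 0 (· + 1)) PySem.Dict.empty).getD
        (r, PySem.List.pyGetD p (PySem.Int.mod r (p.length : Int)) 0) 0)).sum
    = (cyc p p.length ys 0 : Int) := by
  rw [show (40:Int) = ((40:Nat):Int) from rfl, PySem.List.pyRange_zero_natCast, List.map_map]
  rw [← bsum_eq_cyc p hd ys 0]
  congr 1
  apply List.map_congr_left
  intro k hk
  simp only [Function.comp]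
  rw [PySem.Dict.getD_foldl_modify_add_one]
  have hmod : PySem.Int.mod ((k:Int)) ((p.length : Nat) : Int) = ((k % p.length : Nat) : Int) := by
    simp [PySem.Int.mod, Int.fmod_eq_emod]
  rw [hmod, PySem.List.pyGetD_natCast]
  simp

-- ===== VERDICT (by name: the statement is the Claim_ definition above) =====
theorem solution_spec : Claim_equal_solution := by
  intro answers _
  show solution answers = solution_alt answers
  unfold solution solution_alt
  simp only [List.foldl_cons, List.foldl_nil, List.nil_append, bPatterns,
    List.map_cons, List.map_nil]
  have e1 := score_entry ([1,2,3,4,5] : List Int) 2000 (by decide) answers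
  have e2 := score_entry ([2,1,2,3,2,4,2,5] : List Int) 1250 (by decide) answers
  have e3 := score_entry ([3,3,1,1,2,2,4,4,5,5] : List Int) 1000 (by decide) answers
  have b1 := b_entry ([1,2,3,4,5] : List Int) (by decide) (answers.take 10000)
  have b2 := b_entry ([2,1,2,3,2,4,2,5] : List Int) (by decide) (answers.take 10000)
  have b3 := b_entry ([3,3,1,1,2,2,4,4,5,5] : List Int) (by decide) (answers.take 10000)
  rw [e1, e2, e3]
  rw [show pairsFrom 0 (answers.take 10000) =
      (PySem.List.enumerate (answers.take 10000)).map
        (fun q => (PySem.Int.mod q.1 40, q.2)) from rfl] at b1 b2 b3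
  rw [b1, b2, b3]
  simp
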